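-- pv_equiv track=rewrite | github.com/eliottcassidy2000/math | 04-computation/betti_criterion.py | is_strongly_connected
-- ===== SOURCE A (Python) =====
-- def is_strongly_connected(A, n):
--     """Check if tournament is strongly connected (has a directed Hamiltonian cycle)."""
--     # BFS reachability from vertex 0
--     visited = {0}
--     queue = [0]
--     while queue:
--         v = queue.pop(0)
--         for u in range(n):
--             if A[v][u] and u not in visited:
--                 visited.add(u)
--                 queue.append(u)
--     if len(visited) < n:
--         return False
--     # Reverse reachability
--     visited = {0}
--     queue = [0]
--     while queue:
--         v = queue.pop(0)
--         for u in range(n):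
--             if A[u][v] and u not in visited:
--                 visited.add(u)
--                 queue.append(u)
--     return len(visited) == n
-- ===== SOURCE B (Python) =====
-- def is_strongly_connected(A, n):
--     """Check if tournament is strongly connected (has a directed Hamiltonian cycle)."""
--     def full(get):
--         # round-based saturation: n rounds of "add every vertex with an edge
--         # from the current set", then compare sizes
--         seen = {0}
--         for _ in range(n):
--             seen |= {u for u in range(n) if any(get(v, u) for v in seen)}
--         return len(seen) == n
--     return full(lambda v, u: A[v][u]) and full(lambda v, u: A[u][v])
-- ===== Notes on version B (the rewrite author's own statement) =====
-- stated objective: alternative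
-- what changed: The two on-demand BFS traversals with an explicit FIFO queue are replaced by round-based saturation: n rounds of 'add every vertex with an edge from the current set' computed from the whole current set, then two size checks; no queue or per-vertex frontier state is kept.
-- outside the precondition, e.g. on is_strongly_connected([[0, 0], [1]], 2): A returns False, B returns False
import Mathlib
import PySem

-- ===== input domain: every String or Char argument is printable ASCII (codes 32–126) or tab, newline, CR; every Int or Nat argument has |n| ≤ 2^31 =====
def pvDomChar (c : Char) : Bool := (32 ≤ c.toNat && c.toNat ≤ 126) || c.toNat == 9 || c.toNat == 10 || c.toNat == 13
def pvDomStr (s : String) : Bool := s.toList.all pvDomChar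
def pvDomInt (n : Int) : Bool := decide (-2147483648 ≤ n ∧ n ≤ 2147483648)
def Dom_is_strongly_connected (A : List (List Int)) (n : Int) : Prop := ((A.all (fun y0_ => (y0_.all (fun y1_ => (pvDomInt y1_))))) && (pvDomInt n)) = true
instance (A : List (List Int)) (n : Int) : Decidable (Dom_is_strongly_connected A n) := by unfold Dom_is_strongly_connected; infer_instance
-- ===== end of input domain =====

-- B replaces A's two queue-based BFS traversals by round-based saturation (n rounds of
-- frontier expansion from the whole current set) with two size checks: an alternative
-- decomposition of the same double-reachability test; equivalence of return values is proved.

-- ===== PORT A =====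

-- A[v][u]; totalized with default 0 — Pre_ keeps the indices Python uses in range
def pvEntry (A : List (List Int)) (v u : Int) : Int :=
  (PySem.List.pyGet? ((PySem.List.pyGet? A v).getD []) u).getD 0

-- edge test used by the forward (rev=false: A[v][u]) and reverse (rev=true: A[u][v]) passes
def pvRow (A : List (List Int)) (rev : Bool) (v u : Int) : Int :=
  if rev then pvEntry A u v else pvEntry A v u

-- body of 'for u in range(n): if A[v][u] and u not in visited: visited.add(u); queue.append(u)'
def pvBfsFold (e : Int → Int) (st : List Int × List Int) (u : Int) : List Int × List Int :=
  if e u ≠ 0 ∧ u ∉ st.1 then (st.1 ++ [u], st.2 ++ [u]) else st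

-- the 'while queue:' loop; fuel n.toNat+1 bounds the iteration count (≤ 1 + #enqueues ≤ n+1)
def pvBfsLoop (A : List (List Int)) (n : Int) (rev : Bool) :
    Nat → List Int → List Int → List Int
  | 0, visited, _ => visited
  | fuel+1, visited, queue =>
    match queue with
    | [] => visited
    | v :: qs =>
      let st := (PySem.List.pyRange 0 n 1).foldl (pvBfsFold (pvRow A rev v)) (visited, qs)
      pvBfsLoop A n rev fuel st.1 st.2

def is_strongly_connected (A : List (List Int)) (n : Int) : Bool :=
  if ((pvBfsLoop A n false (n.toNat + 1) [0] [0]).length : Int) < n then false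
  else decide (((pvBfsLoop A n true (n.toNat + 1) [0] [0]).length : Int) = n)

-- ===== PORT B =====

-- one addition of 'seen |= {u for u in range(n) if any(get(v,u) for v in seen)}'
def pvSatFoldF (p : Int → Bool) (s : List Int) (u : Int) : List Int :=
  if p u ∧ u ∉ s then s ++ [u] else s

def pvSatStep (A : List (List Int)) (n : Int) (rev : Bool) (seen : List Int) : List Int :=
  (PySem.List.pyRange 0 n 1).foldl
    (pvSatFoldF (fun u => seen.any fun v => pvRow A rev v u != 0)) seen

-- 'for _ in range(n): …'
def pvSat (A : List (List Int)) (n : Int) (rev : Bool) : Nat → List Int → List Int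
  | 0, s => s
  | k+1, s => pvSat A n rev k (pvSatStep A n rev s)

def is_strongly_connected_alt (A : List (List Int)) (n : Int) : Bool :=
  decide (((pvSat A n false n.toNat [0]).length : Int) = n) &&
  decide (((pvSat A n true n.toNat [0]).length : Int) = n)

-- ===== PRECONDITION & SPEC =====
-- Pre_ requires a well-formed matrix for a digraph on n vertices (first n rows present with
-- length ≥ n): outside it Python A raises IndexError, except on ragged matrices whose short
-- rows are unreachable from vertex 0, where A happens to return (B returns the same there).
def Pre_is_strongly_connected (A : List (List Int)) (n : Int) : Prop :=
  n ≤ (A.length : Int) ∧ ∀ row ∈ A.take n.toNat, n ≤ (row.length : Int)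
instance (A : List (List Int)) (n : Int) : Decidable (Pre_is_strongly_connected A n) := by
  unfold Pre_is_strongly_connected; infer_instance

def pvWitness_is_strongly_connected : List (List Int) × Int := ([[0, 1], [1, 0]], 2)

def Spec_is_strongly_connected (A : List (List Int)) (n : Int) (out : Bool) : Prop := out = is_strongly_connected_alt A n
instance (A : List (List Int)) (n : Int) (out : Bool) : Decidable (Spec_is_strongly_connected A n out) := by unfold Spec_is_strongly_connected; infer_instance

-- ===== CLAIM (what is proved, stated in full; the proofs are below) =====
def Claim_equal_is_strongly_connected : Prop := ∀ (A : List (List Int)) (n : Int), Dom_is_strongly_connected A n → Pre_is_strongly_connected A n → Spec_is_strongly_connected A n (is_strongly_connected A n)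

-- ===== LEMMAS AND PROOFS =====

-- the edge relation both traversals explore, and reachability from vertex 0
def pvAdj (A : List (List Int)) (n : Int) (rev : Bool) (v u : Int) : Prop :=
  pvRow A rev v u ≠ 0 ∧ 0 ≤ u ∧ u < n

def pvReach (A : List (List Int)) (n : Int) (rev : Bool) (x : Int) : Prop :=
  Relation.ReflTransGen (pvAdj A n rev) 0 x

-- a list containing 0 and closed under the edges contains everything reachable
lemma pv_closed_complete (A : List (List Int)) (n : Int) (rev : Bool) (s : List Int)
    (h0 : (0:Int) ∈ s) (hcl : ∀ v ∈ s, ∀ u, pvAdj A n rev v u → u ∈ s) :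
    ∀ x, pvReach A n rev x → x ∈ s := by
  intro x hx
  induction hx with
  | refl => exact h0
  | tail _ hadj ih => exact hcl _ ih _ hadj

lemma pv_bfs_fold_spec (e : Int → Int) (U : Finset Int) :
    ∀ (L vis qs : List Int), (∀ u ∈ L, u ∈ U) → vis.Nodup →
    (∀ x, x ∈ (L.foldl (pvBfsFold e) (vis, qs)).1 ↔ x ∈ vis ∨ (x ∈ L ∧ e x ≠ 0)) ∧
    (L.foldl (pvBfsFold e) (vis, qs)).1.Nodup ∧
    (∀ x ∈ (L.foldl (pvBfsFold e) (vis, qs)).2, x ∈ qs ∨ x ∈ (L.foldl (pvBfsFold e) (vis, qs)).1) ∧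
    (∀ x ∈ (L.foldl (pvBfsFold e) (vis, qs)).1, x ∈ vis ∨ x ∈ (L.foldl (pvBfsFold e) (vis, qs)).2) ∧
    ((L.foldl (pvBfsFold e) (vis, qs)).2.length
        + (U \ (L.foldl (pvBfsFold e) (vis, qs)).1.toFinset).card
      = qs.length + (U \ vis.toFinset).card) ∧
    (∀ x ∈ vis, x ∈ (L.foldl (pvBfsFold e) (vis, qs)).1) ∧
    (∀ x ∈ qs, x ∈ (L.foldl (pvBfsFold e) (vis, qs)).2) := by
  intro L
  induction L with
  | nil =>
    intro vis qs _ hnd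
    exact ⟨by simp, hnd, fun x hx => Or.inl hx, fun x hx => Or.inl hx, rfl,
      fun x hx => hx, fun x hx => hx⟩
  | cons a L ih =>
    intro vis qs hU hnd
    have hU' : ∀ u ∈ L, u ∈ U := fun u hu => hU u (List.mem_cons_of_mem a hu)
    have hstep : pvBfsFold e (vis, qs) a
        = if e a ≠ 0 ∧ a ∉ vis then (vis ++ [a], qs ++ [a]) else (vis, qs) := rfl
    rw [List.foldl_cons, hstep]
    by_cases h : e a ≠ 0 ∧ a ∉ vis
    · rw [if_pos h]
      have hnd' : (vis ++ [a]).Nodup := by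
        simp [List.nodup_append, hnd]
        exact fun y hy hya => h.2 (hya ▸ hy)
      obtain ⟨m1, m2, m3, m4, m5, m6, m7⟩ := ih (vis ++ [a]) (qs ++ [a]) hU' hnd'
      have hins : (vis ++ [a]).toFinset = insert a vis.toFinset := by
        ext y
        simp
      have ha_mem : a ∈ U \ vis.toFinset :=
        Finset.mem_sdiff.2 ⟨hU a List.mem_cons_self, by simpa using h.2⟩
      refine ⟨?_, m2, ?_, ?_, ?_, ?_, ?_⟩
      · intro x
        rw [m1 x]
        constructor
        · rintro (hx | ⟨hxL, hxe⟩)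
          · rcases List.mem_append.1 hx with hv | ha
            · exact Or.inl hv
            · have hxa : x = a := by simpa using ha
              exact Or.inr ⟨by simp [hxa], hxa ▸ h.1⟩
          · exact Or.inr ⟨List.mem_cons_of_mem a hxL, hxe⟩
        · rintro (hx | ⟨hxc, hxe⟩)
          · exact Or.inl (List.mem_append.2 (Or.inl hx))
          · rcases List.mem_cons.1 hxc with rfl | hxL
            · exact Or.inl (List.mem_append.2 (Or.inr (by simp)))
            · exact Or.inr ⟨hxL, hxe⟩
      · intro x hx
        rcases m3 x hx with hq | hs
        · rcases List.mem_append.1 hq with hq2 | ha2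
          · exact Or.inl hq2
          · have hxa : x = a := by simpa using ha2
            exact Or.inr (m6 x (by simp [hxa]))
        · exact Or.inr hs
      · intro x hx
        rcases m4 x hx with hv | hq
        · rcases List.mem_append.1 hv with hv2 | ha2
          · exact Or.inl hv2
          · have hxa : x = a := by simpa using ha2
            exact Or.inr (m7 x (by simp [hxa]))
        · exact Or.inr hq
      · have hcard : (U \ (vis ++ [a]).toFinset).card + 1 = (U \ vis.toFinset).card := by
          rw [hins, Finset.sdiff_insert, Finset.card_erase_of_mem ha_mem]
          have := Finset.card_pos.2 ⟨a, ha_mem⟩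
          omega
        simp only [List.length_append, List.length_singleton] at m5
        omega
      · intro x hx
        exact m6 x (by simp [hx])
      · intro x hx
        exact m7 x (by simp [hx])
    · rw [if_neg h]
      obtain ⟨m1, m2, m3, m4, m5, m6, m7⟩ := ih vis qs hU' hnd
      refine ⟨?_, m2, m3, m4, m5, m6, m7⟩
      intro x
      rw [m1 x]
      constructor
      · rintro (hx | ⟨hxL, hxe⟩)
        · exact Or.inl hx
        · exact Or.inr ⟨List.mem_cons_of_mem a hxL, hxe⟩
      · rintro (hx | ⟨hxc, hxe⟩)
        · exact Or.inl hx
        · rcases List.mem_cons.1 hxc with rfl | hxL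
          · exact Or.inl (not_not.1 ((not_and.1 h) hxe))
          · exact Or.inr ⟨hxL, hxe⟩

lemma pv_bfs_spec (A : List (List Int)) (n : Int) (rev : Bool) :
    ∀ (fuel : Nat) (vis queue : List Int),
    vis.Nodup → (0:Int) ∈ vis →
    (∀ x ∈ vis, pvReach A n rev x) →
    (∀ q ∈ queue, q ∈ vis) →
    (∀ v ∈ vis, v ∉ queue → ∀ u, pvAdj A n rev v u → u ∈ vis) →
    queue.length + ((PySem.List.pyRange 0 n 1).toFinset \ vis.toFinset).card ≤ fuel →
    (pvBfsLoop A n rev fuel vis queue).Nodup ∧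
    (∀ x, x ∈ pvBfsLoop A n rev fuel vis queue ↔ pvReach A n rev x) := by
  intro fuel
  induction fuel with
  | zero =>
    intro vis queue hnd h0 hre hq hcl hfuel
    have hq0 : queue = [] := by
      cases queue with
      | nil => rfl
      | cons v qs => simp at hfuel
    subst hq0
    refine ⟨hnd, fun x => ⟨fun hx => hre x hx, fun hx => ?_⟩⟩
    exact pv_closed_complete A n rev vis h0
      (fun v hv u hadj => hcl v hv (by simp) u hadj) x hx
  | succ f ih =>
    intro vis queue hnd h0 hre hq hcl hfuel
    cases queue with
    | nil =>
      refine ⟨hnd, fun x => ⟨fun hx => hre x hx, fun hx => ?_⟩⟩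
      exact pv_closed_complete A n rev vis h0
        (fun v hv u hadj => hcl v hv (by simp) u hadj) x hx
    | cons v qs =>
      have hv : v ∈ vis := hq v List.mem_cons_self
      obtain ⟨m1, m2, m3, m4, m5, m6, m7⟩ :=
        pv_bfs_fold_spec (pvRow A rev v) ((PySem.List.pyRange 0 n 1).toFinset)
          (PySem.List.pyRange 0 n 1) vis qs (fun u hu => List.mem_toFinset.2 hu) hnd
      set st := (PySem.List.pyRange 0 n 1).foldl (pvBfsFold (pvRow A rev v)) (vis, qs) with hst
      have hrun : pvBfsLoop A n rev (f+1) vis (v :: qs) = pvBfsLoop A n rev f st.1 st.2 := rfl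
      rw [hrun]
      apply ih st.1 st.2 m2 (m6 0 h0)
      · intro x hx
        rcases (m1 x).1 hx with hxv | ⟨hxR, hxe⟩
        · exact hre x hxv
        · have hb := PySem.List.mem_pyRange_one.1 hxR
          exact Relation.ReflTransGen.tail (hre v hv) ⟨hxe, hb.1, hb.2⟩
      · intro x hx
        rcases m3 x hx with hxq | hxs
        · exact m6 x (hq x (List.mem_cons_of_mem v hxq))
        · exact hxs
      · intro w hw hwq u hadj
        rcases m4 w hw with hwv | hws
        · by_cases hwv' : w = v
          · subst hwv'
            exact (m1 u).2 (Or.inr ⟨PySem.List.mem_pyRange_one.2 ⟨hadj.2.1, hadj.2.2⟩, hadj.1⟩)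
          · have hwqs : w ∉ qs := fun hmem => hwq (m7 w hmem)
            exact m6 u (hcl w hwv (by simp [hwv', hwqs]) u hadj)
        · exact absurd hws hwq
      · simp only [List.length_cons] at hfuel
        omega

lemma pv_bfs_main (A : List (List Int)) (n : Int) (rev : Bool) :
    (pvBfsLoop A n rev (n.toNat + 1) [0] [0]).Nodup ∧
    (∀ x, x ∈ pvBfsLoop A n rev (n.toNat + 1) [0] [0] ↔ pvReach A n rev x) := by
  have hcardR : (PySem.List.pyRange 0 n 1).toFinset.card = n.toNat := by
    rw [List.toFinset_card_of_nodup (PySem.List.nodup_pyRange_one 0 n), PySem.List.length_pyRange_one]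
    simp
  apply pv_bfs_spec A n rev (n.toNat + 1) [0] [0]
  · simp
  · simp
  · intro x hx
    have : x = 0 := by simpa using hx
    exact this ▸ Relation.ReflTransGen.refl
  · intro q hq
    exact hq
  · intro v hv hvq
    exact absurd hv hvq
  · have hle : ((PySem.List.pyRange 0 n 1).toFinset \ ([0] : List Int).toFinset).card
        ≤ (PySem.List.pyRange 0 n 1).toFinset.card :=
      Finset.card_le_card (Finset.sdiff_subset)
    simp only [List.length_singleton]
    omega

lemma pv_sat_fold_spec (p : Int → Bool) :
    ∀ (L s : List Int),
    (∀ x, x ∈ L.foldl (pvSatFoldF p) s ↔ x ∈ s ∨ (x ∈ L ∧ p x = true)) ∧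
    (s.Nodup → (L.foldl (pvSatFoldF p) s).Nodup) ∧
    (∀ x ∈ s, x ∈ L.foldl (pvSatFoldF p) s) := by
  intro L
  induction L with
  | nil => exact fun s => ⟨by simp, fun h => h, fun x hx => hx⟩
  | cons a L ih =>
    intro s
    have hstep : pvSatFoldF p s a = if p a ∧ a ∉ s then s ++ [a] else s := rfl
    rw [List.foldl_cons, hstep]
    by_cases h : (p a : Prop) ∧ a ∉ s
    · rw [if_pos h]
      obtain ⟨m1, m2, m3⟩ := ih (s ++ [a])
      refine ⟨?_, ?_, ?_⟩
      · intro x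
        rw [m1 x]
        constructor
        · rintro (hx | ⟨hxL, hxe⟩)
          · rcases List.mem_append.1 hx with hv | ha
            · exact Or.inl hv
            · have hxa : x = a := by simpa using ha
              exact Or.inr ⟨by simp [hxa], hxa ▸ h.1⟩
          · exact Or.inr ⟨List.mem_cons_of_mem a hxL, hxe⟩
        · rintro (hx | ⟨hxc, hxe⟩)
          · exact Or.inl (List.mem_append.2 (Or.inl hx))
          · rcases List.mem_cons.1 hxc with rfl | hxL
            · exact Or.inl (List.mem_append.2 (Or.inr (by simp)))
            · exact Or.inr ⟨hxL, hxe⟩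
      · intro hnd
        apply m2
        simp [List.nodup_append, hnd]
        exact fun y hy hya => h.2 (hya ▸ hy)
      · intro x hx
        exact m3 x (by simp [hx])
    · rw [if_neg h]
      obtain ⟨m1, m2, m3⟩ := ih s
      refine ⟨?_, m2, m3⟩
      intro x
      rw [m1 x]
      constructor
      · rintro (hx | ⟨hxL, hxe⟩)
        · exact Or.inl hx
        · exact Or.inr ⟨List.mem_cons_of_mem a hxL, hxe⟩
      · rintro (hx | ⟨hxc, hxe⟩)
        · exact Or.inl hx
        · rcases List.mem_cons.1 hxc with rfl | hxL
          · exact Or.inl (not_not.1 ((not_and.1 h) hxe))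
          · exact Or.inr ⟨hxL, hxe⟩

lemma pv_sat_step_mem (A : List (List Int)) (n : Int) (rev : Bool) (s : List Int) :
    ∀ x, x ∈ pvSatStep A n rev s ↔ x ∈ s ∨ ∃ v ∈ s, pvAdj A n rev v x := by
  intro x
  unfold pvSatStep
  rw [(pv_sat_fold_spec _ (PySem.List.pyRange 0 n 1) s).1 x]
  constructor
  · rintro (hx | ⟨hxR, hxe⟩)
    · exact Or.inl hx
    · obtain ⟨v, hv, hve⟩ := List.any_eq_true.1 hxe
      have hb := PySem.List.mem_pyRange_one.1 hxR
      exact Or.inr ⟨v, hv, bne_iff_ne.1 hve, hb.1, hb.2⟩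
  · rintro (hx | ⟨v, hv, hve, hb1, hb2⟩)
    · exact Or.inl hx
    · exact Or.inr ⟨PySem.List.mem_pyRange_one.2 ⟨hb1, hb2⟩,
        List.any_eq_true.2 ⟨v, hv, bne_iff_ne.2 hve⟩⟩

lemma pv_sat_step_nodup (A : List (List Int)) (n : Int) (rev : Bool) (s : List Int)
    (h : s.Nodup) : (pvSatStep A n rev s).Nodup :=
  (pv_sat_fold_spec _ (PySem.List.pyRange 0 n 1) s).2.1 h

lemma pv_sat_step_subset (A : List (List Int)) (n : Int) (rev : Bool) (s : List Int) :
    ∀ x ∈ s, x ∈ pvSatStep A n rev s :=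
  (pv_sat_fold_spec _ (PySem.List.pyRange 0 n 1) s).2.2

lemma pv_sat_step_congr (A : List (List Int)) (n : Int) (rev : Bool) (s s' : List Int)
    (h : ∀ x, x ∈ s ↔ x ∈ s') :
    ∀ x, x ∈ pvSatStep A n rev s ↔ x ∈ pvSatStep A n rev s' := by
  intro x
  rw [pv_sat_step_mem, pv_sat_step_mem]
  constructor
  · rintro (hx | ⟨v, hv, hadj⟩)
    · exact Or.inl ((h x).1 hx)
    · exact Or.inr ⟨v, (h v).1 hv, hadj⟩
  · rintro (hx | ⟨v, hv, hadj⟩)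
    · exact Or.inl ((h x).2 hx)
    · exact Or.inr ⟨v, (h v).2 hv, hadj⟩

lemma pv_sat_comm (A : List (List Int)) (n : Int) (rev : Bool) :
    ∀ (k : Nat) (s : List Int),
    pvSat A n rev k (pvSatStep A n rev s) = pvSatStep A n rev (pvSat A n rev k s) := by
  intro k
  induction k with
  | zero => intro s; rfl
  | succ k ih =>
    intro s
    show pvSat A n rev k (pvSatStep A n rev (pvSatStep A n rev s)) = _
    rw [ih (pvSatStep A n rev s)]
    rfl

lemma pv_sat_add (A : List (List Int)) (n : Int) (rev : Bool) :
    ∀ (a b : Nat) (s : List Int),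
    pvSat A n rev (a + b) s = pvSat A n rev b (pvSat A n rev a s) := by
  intro a
  induction a with
  | zero => intro b s; rw [Nat.zero_add]; rfl
  | succ a ih =>
    intro b s
    have h1 : a + 1 + b = (a + b) + 1 := by omega
    rw [h1]
    show pvSat A n rev (a + b) (pvSatStep A n rev s) = _
    rw [ih b (pvSatStep A n rev s)]
    rfl

lemma pv_sat_nodup (A : List (List Int)) (n : Int) (rev : Bool) :
    ∀ (k : Nat) (s : List Int), s.Nodup → (pvSat A n rev k s).Nodup := by
  intro k
  induction k with
  | zero => exact fun s h => h
  | succ k ih => exact fun s h => ih _ (pv_sat_step_nodup A n rev s h)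

lemma pv_sat_mono (A : List (List Int)) (n : Int) (rev : Bool) :
    ∀ (k : Nat) (s : List Int) (x : Int), x ∈ s → x ∈ pvSat A n rev k s := by
  intro k
  induction k with
  | zero => exact fun s x hx => hx
  | succ k ih => exact fun s x hx => ih _ x (pv_sat_step_subset A n rev s x hx)

lemma pv_sat_sound (A : List (List Int)) (n : Int) (rev : Bool) :
    ∀ (k : Nat) (s : List Int), (∀ x ∈ s, pvReach A n rev x) →
    ∀ x ∈ pvSat A n rev k s, pvReach A n rev x := by
  intro k
  induction k with
  | zero => exact fun s h => h
  | succ k ih =>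
    intro s h
    apply ih
    intro x hx
    rcases (pv_sat_step_mem A n rev s x).1 hx with hxs | ⟨v, hv, hadj⟩
    · exact h x hxs
    · exact Relation.ReflTransGen.tail (h v hv) hadj

lemma pv_sat_fix (A : List (List Int)) (n : Int) (rev : Bool) :
    ∀ (k : Nat) (s : List Int),
    (∀ x, x ∈ pvSatStep A n rev s ↔ x ∈ s) →
    ∀ x, x ∈ pvSat A n rev k s ↔ x ∈ s := by
  intro k
  induction k with
  | zero => exact fun s _ x => Iff.rfl
  | succ k ih =>
    intro s hfix x
    show x ∈ pvSat A n rev k (pvSatStep A n rev s) ↔ _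
    have hfix' : ∀ y, y ∈ pvSatStep A n rev (pvSatStep A n rev s) ↔ y ∈ pvSatStep A n rev s :=
      fun y => pv_sat_step_congr A n rev _ _ hfix y
    rw [ih (pvSatStep A n rev s) hfix' x, hfix x]

lemma pv_sat_bounded (A : List (List Int)) (n : Int) (rev : Bool) :
    ∀ (k : Nat) (s : List Int), (∀ x ∈ s, x = 0 ∨ (0 ≤ x ∧ x < n)) →
    ∀ x ∈ pvSat A n rev k s, x = 0 ∨ (0 ≤ x ∧ x < n) := by
  intro k
  induction k with
  | zero => exact fun s h => h
  | succ k ih =>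
    intro s h
    apply ih
    intro x hx
    rcases (pv_sat_step_mem A n rev s x).1 hx with hxs | ⟨v, _, hadj⟩
    · exact h x hxs
    · exact Or.inr ⟨hadj.2.1, hadj.2.2⟩

lemma pv_sat_final_fix (A : List (List Int)) (n : Int) (rev : Bool) :
    ∀ x, x ∈ pvSatStep A n rev (pvSat A n rev n.toNat [0]) ↔
         x ∈ pvSat A n rev n.toNat [0] := by
  rcases (by omega : n ≤ 0 ∨ 0 < n) with hn | hn
  · have ht : n.toNat = 0 := by omega
    have hr : PySem.List.pyRange 0 n 1 = [] := PySem.List.pyRange_one_eq_nil hn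
    intro x
    rw [ht]
    show x ∈ pvSatStep A n rev [0] ↔ x ∈ ([0] : List Int)
    unfold pvSatStep
    rw [hr]
    rfl
  · -- cardinality climb: either a fixpoint occurs among the first n.toNat iterates
    -- or the card of the k-th iterate exceeds k
    have hcardR : (PySem.List.pyRange 0 n 1).toFinset.card = n.toNat := by
      rw [List.toFinset_card_of_nodup (PySem.List.nodup_pyRange_one 0 n),
        PySem.List.length_pyRange_one]
      simp
    have hclimb : ∀ k : Nat,
        (∃ j ≤ k, ∀ x, x ∈ pvSatStep A n rev (pvSat A n rev j [0]) ↔ x ∈ pvSat A n rev j [0]) ∨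
        k + 1 ≤ (pvSat A n rev k [0]).toFinset.card := by
      intro k
      induction k with
      | zero =>
        right
        show 0 + 1 ≤ ([0] : List Int).toFinset.card
        simp
      | succ k ih =>
        rcases ih with ⟨j, hj, hfix⟩ | hcard
        · exact Or.inl ⟨j, by omega, hfix⟩
        · by_cases hfix : ∀ x, x ∈ pvSatStep A n rev (pvSat A n rev k [0]) ↔ x ∈ pvSat A n rev k [0]
          · exact Or.inl ⟨k, by omega, hfix⟩
          · right
            have hS : pvSat A n rev (k + 1) [0] = pvSatStep A n rev (pvSat A n rev k [0]) := by
              show pvSat A n rev k (pvSatStep A n rev [0]) = _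
              exact pv_sat_comm A n rev k [0]
            have hsub : (pvSat A n rev k [0]).toFinset ⊆ (pvSat A n rev (k + 1) [0]).toFinset := by
              intro y hy
              rw [hS, List.mem_toFinset, pv_sat_step_mem]
              exact Or.inl (List.mem_toFinset.1 hy)
            have hne : (pvSat A n rev k [0]).toFinset ≠ (pvSat A n rev (k + 1) [0]).toFinset := by
              intro heq
              apply hfix
              intro x
              constructor
              · intro hx
                have : x ∈ (pvSat A n rev (k + 1) [0]).toFinset := by
                  rw [← hS] at hx
                  exact List.mem_toFinset.2 hx
                rw [← heq] at this
                exact List.mem_toFinset.1 this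
              · intro hx
                exact (pv_sat_step_mem A n rev _ x).2 (Or.inl hx)
            have := Finset.card_lt_card (lt_of_le_of_ne hsub hne)
            omega
    rcases hclimb n.toNat with ⟨j, hj, hfix⟩ | hcard
    · -- the final iterate is set-equal to the fixed iterate, hence itself fixed
      have hfin : ∀ x, x ∈ pvSat A n rev n.toNat [0] ↔ x ∈ pvSat A n rev j [0] := by
        intro x
        have hsplit : n.toNat = j + (n.toNat - j) := by omega
        rw [hsplit, pv_sat_add]
        exact pv_sat_fix A n rev (n.toNat - j) (pvSat A n rev j [0]) hfix x
      intro x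
      rw [pv_sat_step_congr A n rev _ _ hfin x, hfix x, ← hfin x]
    · -- impossible: the iterates live inside range(n), which has card n.toNat
      exfalso
      have hsub : (pvSat A n rev n.toNat [0]).toFinset ⊆ (PySem.List.pyRange 0 n 1).toFinset := by
        intro y hy
        rcases pv_sat_bounded A n rev n.toNat [0] (by simp [hn]) y (List.mem_toFinset.1 hy) with rfl | hb
        · exact List.mem_toFinset.2 (PySem.List.mem_pyRange_one.2 ⟨le_refl 0, hn⟩)
        · exact List.mem_toFinset.2 (PySem.List.mem_pyRange_one.2 hb)
      have := Finset.card_le_card hsub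
      omega

lemma pv_sat_main (A : List (List Int)) (n : Int) (rev : Bool) :
    (pvSat A n rev n.toNat [0]).Nodup ∧
    (∀ x, x ∈ pvSat A n rev n.toNat [0] ↔ pvReach A n rev x) := by
  refine ⟨pv_sat_nodup A n rev n.toNat [0] (by simp), fun x => ⟨?_, ?_⟩⟩
  · intro hx
    apply pv_sat_sound A n rev n.toNat [0] _ x hx
    intro y hy
    have : y = 0 := by simpa using hy
    exact this ▸ Relation.ReflTransGen.refl
  · intro hx
    apply pv_closed_complete A n rev _ (pv_sat_mono A n rev n.toNat [0] 0 (by simp)) _ x hx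
    intro v hv u hadj
    exact (pv_sat_final_fix A n rev u).1
      ((pv_sat_step_mem A n rev _ u).2 (Or.inr ⟨v, hv, hadj⟩))

lemma pv_counts_eq (A : List (List Int)) (n : Int) (rev : Bool) :
    (pvBfsLoop A n rev (n.toNat + 1) [0] [0]).length = (pvSat A n rev n.toNat [0]).length := by
  obtain ⟨hnd1, hm1⟩ := pv_bfs_main A n rev
  obtain ⟨hnd2, hm2⟩ := pv_sat_main A n rev
  have hfs : (pvBfsLoop A n rev (n.toNat + 1) [0] [0]).toFinset
      = (pvSat A n rev n.toNat [0]).toFinset := by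
    ext y
    rw [List.mem_toFinset, List.mem_toFinset, hm1 y, hm2 y]
  rw [← List.toFinset_card_of_nodup hnd1, ← List.toFinset_card_of_nodup hnd2, hfs]

lemma pv_count_le (A : List (List Int)) (n : Int) (rev : Bool) (h : 1 ≤ n) :
    ((pvSat A n rev n.toNat [0]).length : Int) ≤ n := by
  obtain ⟨hnd, hm⟩ := pv_sat_main A n rev
  have hsub : (pvSat A n rev n.toNat [0]).toFinset ⊆ (PySem.List.pyRange 0 n 1).toFinset := by
    intro y hy
    rcases pv_sat_bounded A n rev n.toNat [0] (by simp) y (List.mem_toFinset.1 hy)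
      with rfl | hb
    · exact List.mem_toFinset.2 (PySem.List.mem_pyRange_one.2 ⟨le_refl 0, by omega⟩)
    · exact List.mem_toFinset.2 (PySem.List.mem_pyRange_one.2 hb)
  have hcardR : (PySem.List.pyRange 0 n 1).toFinset.card = n.toNat := by
    rw [List.toFinset_card_of_nodup (PySem.List.nodup_pyRange_one 0 n),
      PySem.List.length_pyRange_one]
    simp
  have h1 := Finset.card_le_card hsub
  have h2 := List.toFinset_card_of_nodup hnd
  omega

-- ===== VERDICT (by name: the statement is the Claim_ definition above) =====
theorem is_strongly_connected_spec : Claim_equal_is_strongly_connected := by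
  intro A n _ _
  unfold Spec_is_strongly_connected is_strongly_connected is_strongly_connected_alt
  rw [pv_counts_eq A n false, pv_counts_eq A n true]
  rcases (by omega : n ≤ 0 ∨ 0 < n) with hn | hn
  · have ht : n.toNat = 0 := by omega
    have e0 : ∀ rev, pvSat A n rev 0 [0] = [0] := fun _ => rfl
    rw [ht, e0, e0]
    have h1 : ¬((([0] : List Int).length : Int) < n) := by simp; omega
    have h2 : decide ((([0] : List Int).length : Int) = n) = false := by simp; omega
    rw [if_neg h1, h2]
    simp
  · have hle1 := pv_count_le A n false (by omega)
    by_cases hc : ((pvSat A n false n.toNat [0]).length : Int) = n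
    · rw [if_neg (by omega : ¬(((pvSat A n false n.toNat [0]).length : Int) < n)),
        decide_eq_true hc, Bool.true_and]
    · rw [if_pos (by omega : ((pvSat A n false n.toNat [0]).length : Int) < n),
        decide_eq_false hc, Bool.false_and]
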